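-- pv_equiv track=rewrite | github.com/UTB1988/GeekBrains | 01 - Основы языка Python/HW_04.py | task7_func
-- ===== SOURCE A (Python) =====
-- from itertools import count
-- from itertools import count
--
-- def task7_func(end):
--     y = 1
--     for x in count(1, 1):
--         if x > end:
--             break
--         else:
--             yield f'{x} ({y * x})'
--             y *= x
-- ===== SOURCE B (Python) =====
-- # Different algorithm: each line's factorial is the binary-splitting product of
-- # 1..x (a divide-and-conquer product tree), computed independently inside a
-- # plain while loop; no running product is threaded across iterations.
-- def _prod(lo, hi):
--     """Product of the integers lo..hi inclusive, by binary splitting."""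
--     if lo > hi:
--         return 1
--     if lo == hi:
--         return lo
--     mid = (lo + hi) // 2
--     return _prod(lo, mid) * _prod(mid + 1, hi)
--
--
-- def task7_func(end):
--     x = 1
--     while x <= end:
--         yield f'{x} ({_prod(1, x)})'
--         x += 1
-- ===== Notes on version B (the rewrite author's own statement) =====
-- stated objective: alternative
-- what changed: Drops A's threaded running-product accumulator: B is a while loop that computes each line's factorial independently as a divide-and-conquer binary-splitting product of 1..x (a product tree), the classic fast-factorial technique for big integers.
import Mathlib
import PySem

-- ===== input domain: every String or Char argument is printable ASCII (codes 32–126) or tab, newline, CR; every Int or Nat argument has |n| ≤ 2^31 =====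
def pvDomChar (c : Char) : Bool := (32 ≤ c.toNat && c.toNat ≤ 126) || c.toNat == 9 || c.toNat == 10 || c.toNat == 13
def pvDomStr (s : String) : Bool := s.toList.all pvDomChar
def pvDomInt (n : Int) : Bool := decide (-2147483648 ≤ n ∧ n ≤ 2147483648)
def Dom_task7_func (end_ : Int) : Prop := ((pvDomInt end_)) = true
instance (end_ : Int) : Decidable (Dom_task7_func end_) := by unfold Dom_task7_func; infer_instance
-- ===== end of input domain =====

-- B drops A's threaded running-product accumulator: each line's factorial is
-- computed independently as a binary-splitting product of 1..x (alternative).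

-- f'{x} ({v})'
def task7_fmt (x v : Int) : String :=
  PySem.Int.toStr x ++ " (" ++ PySem.Int.toStr v ++ ")"

-- ===== PORT A =====
-- A's generator: x counts up from 1, y is the running product; the loop breaks
-- when x > end. Fuel end_.toNat bounds the (exactly end_.toNat) yields.
def task7_aux (end_ : Int) : Int → Int → Nat → List String
  | _, _, 0 => []
  | x, y, Nat.succ n =>
    if x > end_ then []
    else task7_fmt x (y * x) :: task7_aux end_ (x + 1) (y * x) n

def task7_func (end_ : Int) : List String :=
  task7_aux end_ 1 1 end_.toNat

-- ===== PORT B =====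
-- Source B's _prod: product of lo..hi inclusive by binary splitting (mid = (lo+hi)//2).
def task7_prod (lo hi : Int) : Int :=
  if lo > hi then 1
  else if lo = hi then lo
  else
    let mid := PySem.Int.floordiv (lo + hi) 2
    task7_prod lo mid * task7_prod (mid + 1) hi
termination_by (hi - lo).toNat
decreasing_by
  all_goals
    rw [PySem.Int.floordiv_eq_ediv_of_pos (by omega)]
    omega

-- Source B's while loop: while x <= end: yield line; x += 1.  Fuel end_.toNat.
def task7_alt_aux (end_ : Int) : Int → Nat → List String
  | _, 0 => []
  | x, Nat.succ n =>
    if x ≤ end_ then task7_fmt x (task7_prod 1 x) :: task7_alt_aux end_ (x + 1) n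
    else []

def task7_func_alt (end_ : Int) : List String :=
  task7_alt_aux end_ 1 end_.toNat

-- ===== PRECONDITION & SPEC =====
def Spec_task7_func (end_ : Int) (out : List String) : Prop := out = task7_func_alt end_
instance (end_ : Int) (out : List String) : Decidable (Spec_task7_func end_ out) := by unfold Spec_task7_func; infer_instance

-- ===== CLAIM (what is proved, stated in full; the proofs are below) =====
def Claim_equal_task7_func : Prop := ∀ (end_ : Int), Dom_task7_func end_ → Spec_task7_func end_ (task7_func end_)

-- ===== LEMMAS AND PROOFS =====

-- reference product: lo * (lo+1) * … * (lo+n-1)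
def task7_pR (lo : Int) : Nat → Int
  | 0 => 1
  | n + 1 => lo * task7_pR (lo + 1) n

lemma task7_pR_add (m : Nat) : ∀ (k : Nat) (lo : Int),
    task7_pR lo (m + k) = task7_pR lo m * task7_pR (lo + m) k := by
  induction m with
  | zero => intro k lo; simp [task7_pR]
  | succ m ih =>
    intro k lo
    have h1 : m + 1 + k = (m + k) + 1 := by omega
    rw [h1]
    simp only [task7_pR, ih k (lo + 1)]
    have h2 : lo + 1 + (m : Int) = lo + ((m : Nat) + 1 : Nat) := by push_cast; ring
    rw [h2]
    ring

-- binary splitting computes the reference product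
lemma task7_prod_eq (n : Nat) : ∀ (lo hi : Int), (hi - lo).toNat ≤ n → lo ≤ hi →
    task7_prod lo hi = task7_pR lo (hi - lo + 1).toNat := by
  induction n with
  | zero =>
    intro lo hi hn hle
    have : lo = hi := by omega
    subst this
    simp [task7_prod, task7_pR]
  | succ n ih =>
    intro lo hi hn hle
    rcases em (lo = hi) with h | h
    · subst h
      simp [task7_prod, task7_pR]
    · have hlt : lo < hi := by omega
      rw [task7_prod, if_neg (by omega), if_neg h]
      have hmid := PySem.Int.floordiv_eq_ediv_of_pos (a := lo + hi) (b := 2) (by omega)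
      set mid := PySem.Int.floordiv (lo + hi) 2 with hm
      have hb1 : lo ≤ mid := by omega
      have hb2 : mid < hi := by omega
      show task7_prod lo mid * task7_prod (mid + 1) hi = _
      rw [ih lo mid (by omega) hb1, ih (mid + 1) hi (by omega) (by omega)]
      have e1 : hi - (mid + 1) + 1 = hi - mid := by ring
      have e2 : (mid + 1 : Int) = lo + ((mid - lo + 1).toNat : Int) := by omega
      rw [e1, e2, ← task7_pR_add (mid - lo + 1).toNat (hi - mid).toNat lo]
      congr 1
      omega

-- A's invariant y = 1·2·…·(x-1) stepped against B's per-line product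
lemma task7_aux_eq (n : Nat) : ∀ (x e : Int), 1 ≤ x →
    task7_aux e x (task7_pR 1 (x - 1).toNat) n = task7_alt_aux e x n := by
  induction n with
  | zero => intros; rfl
  | succ n ih =>
    intro x e hx
    simp only [task7_aux, task7_alt_aux]
    rcases em (x ≤ e) with h | h
    · have hstep : task7_pR 1 (x - 1).toNat * x = task7_pR 1 x.toNat := by
        have := task7_pR_add (x - 1).toNat 1 1
        have h1 : (x - 1).toNat + 1 = x.toNat := by omega
        have h2 : (1 : Int) + ((x - 1).toNat : Int) = x := by omega
        rw [h1, h2] at this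
        simp only [task7_pR] at this
        rw [this]; ring
      have hprod : task7_prod 1 x = task7_pR 1 x.toNat := by
        rw [task7_prod_eq (x - 1).toNat 1 x (by omega) hx]
        congr 1
        omega
      rw [if_neg (by omega), if_pos h, hstep, hprod]
      have := ih (x + 1) e (by omega)
      have h3 : (x + 1 - 1 : Int).toNat = x.toNat := by omega
      rw [h3] at this
      rw [this]
    · rw [if_pos (by omega), if_neg (by omega)]

-- ===== VERDICT (by name: the statement is the Claim_ definition above) =====
theorem task7_func_spec : Claim_equal_task7_func := by
  intro e _
  unfold Spec_task7_func task7_func task7_func_alt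
  have h0 : task7_pR 1 ((1 : Int) - 1).toNat = 1 := by norm_num [task7_pR]
  have := task7_aux_eq e.toNat 1 e (by omega)
  rw [h0] at this
  exact this
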